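-- pv_equiv track=rewrite | github.com/awkwar1996/Paper-4 | LoadData.py | O_plus
-- ===== SOURCE A (Python) =====
-- def O_plus(O):
--     O_plus = {}
--     for key in O.keys():
--         O_plus[key] = []
--         for another_key in O.keys():
--             if another_key == key: continue
--             if key in O[another_key]: O_plus[key].append(another_key)
--     return O_plus
-- ===== SOURCE B (Python) =====
-- def O_plus(O):
--     # One pass: collect (target, source) pairs from a reverse scan, then group.
--     pairs = [(v, j) for j, vals in O.items()
--                     for v in dict.fromkeys(vals)
--                     if v != j and v in O]
--     rev = {k: [] for k in O}
--     for v, j in pairs: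
--         rev[v].append(j)
--     return rev
-- ===== Notes on version B (the rewrite author's own statement) =====
-- stated objective: faster
-- what changed: A scans all other keys for every key (membership test in each value list); B makes a single pass over the entries, collecting (target, source) pairs from each value list (deduplicated, self and non-key targets skipped) and grouping them into a reverse index.
import Mathlib
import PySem

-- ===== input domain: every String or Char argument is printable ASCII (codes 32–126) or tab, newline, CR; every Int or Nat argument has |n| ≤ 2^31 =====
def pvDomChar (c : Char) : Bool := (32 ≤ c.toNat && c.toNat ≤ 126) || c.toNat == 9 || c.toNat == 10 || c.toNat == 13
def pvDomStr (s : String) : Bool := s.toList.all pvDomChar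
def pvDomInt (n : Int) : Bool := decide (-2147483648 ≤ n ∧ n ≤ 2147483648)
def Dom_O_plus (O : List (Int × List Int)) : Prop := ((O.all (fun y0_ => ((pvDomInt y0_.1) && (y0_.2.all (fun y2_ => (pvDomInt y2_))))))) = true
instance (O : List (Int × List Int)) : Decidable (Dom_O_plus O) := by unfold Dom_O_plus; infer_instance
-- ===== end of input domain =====

-- B replaces A's quadratic all-pairs key scan by a single pass over the entries that
-- collects (target, source) pairs and then groups them (a reverse index).

-- ===== PORT A =====
-- A builds its result dict by inserting each distinct key of O once and then appending
-- only to that key's own entry; in the association-list representation of a dict this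
-- is exactly appending one (key, list) entry per key, in key order.
def O_plus (O : List (Int × List Int)) : List (Int × List Int) :=
  let d := PySem.Dict.ofList O
  d.keys.foldl (fun acc key =>
    acc ++ [(key,
      d.keys.foldl (fun lst ak =>
        if ak = key then lst
        else if key ∈ d.getD ak [] then lst ++ [ak] else lst) [])]) []

-- ===== PORT B =====
def O_plus_alt (O : List (Int × List Int)) : List (Int × List Int) :=
  let d := PySem.Dict.ofList O
  let pairs := d.items.flatMap (fun jv =>
    ((PySem.List.dedup jv.2).filter (fun v => v != jv.1 && d.contains v)).map
      (fun v => (v, jv.1)))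
  let rev0 := d.keys.foldl (fun acc k => acc.insert k ([] : List Int)) PySem.Dict.empty
  (pairs.foldl (fun r p => r.modify p.1 [] (· ++ [p.2])) rev0).items

-- ===== PRECONDITION & SPEC =====
def Spec_O_plus (O : List (Int × List Int)) (out : List (Int × List Int)) : Prop := out = O_plus_alt O
instance (O : List (Int × List Int)) (out : List (Int × List Int)) : Decidable (Spec_O_plus O out) := by unfold Spec_O_plus; infer_instance

-- ===== CLAIM (what is proved, stated in full; the proofs are below) =====
def Claim_equal_O_plus : Prop := ∀ (O : List (Int × List Int)), Dom_O_plus O → Spec_O_plus O (O_plus O)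

-- ===== LEMMAS AND PROOFS =====

-- A's inner loop collects, in key order, the other keys whose value list contains `key`.
theorem pv_inner_eq (d : PySem.Dict Int (List Int)) (key : Int) (ks : List Int) :
    ks.foldl (fun lst ak =>
        if ak = key then lst
        else if key ∈ d.getD ak [] then lst ++ [ak] else lst) []
      = ks.filter (fun ak => ak != key && decide (key ∈ d.getD ak [])) := by
  have hfun : (fun (lst : List Int) ak =>
        if ak = key then lst
        else if key ∈ d.getD ak [] then lst ++ [ak] else lst)
      = (fun (lst : List Int) ak =>
        if (ak != key && decide (key ∈ d.getD ak [])) then lst ++ [ak] else lst) := by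
    funext lst ak
    by_cases h1 : ak = key <;> by_cases h2 : key ∈ d.getD ak [] <;> simp [h1, h2]
  rw [hfun]
  have h := PySem.List.foldl_append_if
      (fun ak => ak != key && decide (key ∈ d.getD ak [])) (fun x => x) ks []
  simpa using h

-- the initial dict {k: [] for k in O} of B, as items
theorem pv_rev0_items (d : PySem.Dict Int (List Int)) (hnd : d.keys.Nodup) :
    (d.keys.foldl (fun acc k => acc.insert k ([] : List Int)) PySem.Dict.empty).items
      = d.keys.map (fun k => (k, ([] : List Int))) := by
  have h := PySem.Dict.items_foldl_insert_fresh d.keys (fun a => a)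
      (fun _ => ([] : List Int)) PySem.Dict.empty (by simp) (by simpa using hnd)
  simpa using h

theorem pv_keys_foldl_modify (l : List (Int × Int)) (r : PySem.Dict Int (List Int))
    (h : ∀ p ∈ l, r.contains p.1 = true) :
    (l.foldl (fun r p => r.modify p.1 [] (· ++ [p.2])) r).keys = r.keys := by
  induction l generalizing r with
  | nil => rfl
  | cons p l ih =>
    rw [List.foldl_cons, ih, PySem.Dict.keys_modify,
        PySem.Dict.keys_insert_of_contains _ _ (h p (by simp))]
    intro q hq
    rw [PySem.Dict.contains_modify]
    simp [h q (List.mem_cons_of_mem _ hq)]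

-- filtering a duplicate-free list down to the elements equal to k that satisfy q
theorem pv_filter_and_beq (q : Int → Bool) (k : Int) (l : List Int) (hl : l.Nodup) :
    l.filter (fun v => q v && (v == k)) = if q k && decide (k ∈ l) then [k] else [] := by
  induction l with
  | nil => simp
  | cons a l ih =>
    have hnd : l.Nodup := hl.of_cons
    by_cases hak : a = k
    · subst hak
      have hni : a ∉ l := (List.nodup_cons.mp hl).1
      have htail : l.filter (fun v => q v && (v == a)) = [] := by
        rw [ih hnd]
        simp [hni]
      by_cases hq : q a = true <;> simp [hq, htail]
    · rw [List.filter_cons, ih hnd]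
      by_cases hkl : k ∈ l <;> simp [Ne.symm hak, hkl, show (a == k) = false by simpa using hak]

-- the per-entry contribution of B's pair list to key k
theorem pv_block (q : Int → Bool) (k j : Int) (l : List Int) (hl : l.Nodup) :
    (((l.filter q).map (fun v => (v, j))).filter (fun p => p.1 == k)).map (·.2)
      = if q k && decide (k ∈ l) then [j] else [] := by
  rw [List.filter_map, List.map_map, List.filter_filter]
  have : l.filter (fun a => ((fun (p : Int × Int) => p.1 == k) ∘ fun v => (v, j)) a && q a)
      = l.filter (fun v => q v && (v == k)) := by
    apply List.filter_congr
    intro v _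
    simp [Bool.and_comm]
  rw [this, pv_filter_and_beq q k l hl]
  by_cases h : (q k && decide (k ∈ l)) = true <;> simp [h]

theorem pv_flatMap_ite (c : Int → Bool) (ks : List Int) :
    ks.flatMap (fun j => if c j then [j] else []) = ks.filter c := by
  induction ks with
  | nil => rfl
  | cons a ks ih => by_cases h : c a = true <;> simp [List.flatMap_cons, h, ih]

-- ===== VERDICT (by name: the statement is the Claim_ definition above) =====
theorem O_plus_spec : Claim_equal_O_plus := by
  intro O _
  unfold Spec_O_plus O_plus O_plus_alt
  set d := PySem.Dict.ofList O with hd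
  have hnd : d.keys.Nodup := PySem.Dict.nodup_keys_ofList O
  -- names for B's intermediate values
  set pairs := d.items.flatMap (fun jv =>
    ((PySem.List.dedup jv.2).filter (fun v => v != jv.1 && d.contains v)).map
      (fun v => (v, jv.1))) with hpairs
  set rev0 := d.keys.foldl (fun acc k => acc.insert k ([] : List Int)) PySem.Dict.empty with hrev0
  set rev := pairs.foldl (fun r p => r.modify p.1 [] (· ++ [p.2])) rev0 with hrev
  have h0items : rev0.items = d.keys.map (fun k => (k, ([] : List Int))) := pv_rev0_items d hnd
  have h0keys : rev0.keys = d.keys := by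
    simp only [PySem.Dict.keys, h0items, List.map_map]
    simp
  have h0nd : rev0.keys.Nodup := by rw [h0keys]; exact hnd
  have h0getD : ∀ k, rev0.getD k [] = [] := by
    intro k
    by_cases hc : rev0.contains k = true
    · have hk : k ∈ d.keys := by rwa [PySem.Dict.contains_iff_mem_keys, h0keys] at hc
      exact PySem.Dict.getD_of_mem_items rev0
        (by rw [h0items]; exact List.mem_map.mpr ⟨k, hk, rfl⟩) h0nd []
    · exact PySem.Dict.getD_of_not_contains rev0 [] (by simpa using hc)
  have hpmem : ∀ p ∈ pairs, rev0.contains p.1 = true := by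
    intro p hp
    rw [hpairs] at hp
    simp only [List.mem_flatMap, List.mem_map, List.mem_filter] at hp
    obtain ⟨jv, _, v, ⟨_, hv⟩, rfl⟩ := hp
    simp only [Bool.and_eq_true] at hv
    rw [PySem.Dict.contains_iff_mem_keys, h0keys]
    rw [← PySem.Dict.contains_iff_mem_keys]
    exact hv.2
  have hkeys : rev.keys = d.keys := by rw [hrev, pv_keys_foldl_modify pairs rev0 hpmem, h0keys]
  have hrnd : rev.keys.Nodup := by rw [hkeys]; exact hnd
  have hgetD : ∀ k, rev.getD k [] = (pairs.filter (fun p => p.1 == k)).map (·.2) := by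
    intro k
    rw [hrev, PySem.Dict.getD_foldl_modify_append pairs rev0 k, h0getD, List.nil_append]
  -- items of the two sides
  rw [PySem.List.foldl_append_singleton_eq_map
      (fun key => (key, d.keys.foldl (fun lst ak =>
        if ak = key then lst
        else if key ∈ d.getD ak [] then lst ++ [ak] else lst) [])) d.keys []]
  rw [PySem.Dict.items_eq_map_keys rev hrnd [], hkeys, List.nil_append]
  apply List.map_congr_left
  intro k hk
  rw [pv_inner_eq d k d.keys, hgetD k]
  have hck : d.contains k = true := (PySem.Dict.contains_iff_mem_keys d k).mpr hk
  rw [hpairs, PySem.Dict.items_eq_map_keys d hnd [], List.flatMap_map,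
      List.filter_flatMap, List.map_flatMap]
  have hblocks : ∀ j : Int,
      ((((PySem.List.dedup (d.getD j [])).filter (fun v => v != j && d.contains v)).map
          (fun v => (v, j))).filter (fun p => p.1 == k)).map (·.2)
        = if (j != k && decide (k ∈ d.getD j [])) then [j] else [] := by
    intro j
    rw [pv_block (fun v => v != j && d.contains v) k j _
        (PySem.List.nodup_dedup (d.getD j []))]
    congr 1
    simp only [hck, Bool.and_true, PySem.List.mem_dedup]
    by_cases hjk : j = k
    · simp [hjk]
    · simp [hjk, bne]
      exact fun _ h => hjk h.symm
  simp only [hblocks]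
  rw [pv_flatMap_ite]
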